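-- pv_equiv track=rewrite | github.com/HyunHoCha/distributed_qc | src/utils.py | refined_weights
-- ===== SOURCE A (Python) =====
-- def refined_weights(circuit, n):
--     # edge_weights = [(v1, v2, w), ... ], where (v1, v2) are lexicographically ordered.
--     # n: number of qubits
--
--     edge_weights = []
--     for i in range(n - 1):
--         for j in range(i + 1, n):
--             circuit_ij = [gate for gate in circuit if (len(gate) == 2 and gate[0] in (i, j)) or (len(gate) == 3 and gate[:2] == (i, j))]
--             circuit_ij_unary = [gate for gate in circuit_ij if len(gate) == 2]
--             circuit_ij_cz = [gate for gate in circuit_ij if len(gate) == 3]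
--             w = 0
--             while circuit_ij_cz:
--                 if len(circuit_ij_cz) == 1:
--                     w += 1
--                     circuit_ij_cz.clear()
--                 else:  # len(circuit_ij_cz) >= 2
--                     t1, t2 = circuit_ij_cz[0][2], circuit_ij_cz[1][2]
--                     between_for_i = False
--                     between_for_j = False
--                     for unary_gate in circuit_ij_unary:  # (q, t)
--                         if unary_gate[0] == i and t1 < unary_gate[1] and unary_gate[1] < t2:
--                             between_for_i = True
--                         if unary_gate[0] == j and t1 < unary_gate[1] and unary_gate[1] < t2:
--                             between_for_j = True
--                     if between_for_i and between_for_j: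
--                         w += 1
--                         circuit_ij_cz.pop(0)
--                     elif not between_for_i and between_for_j:  # migrate i to partition of j
--                         w += 1
--                         first_block_unary_time = 100000
--                         for unary_gate in circuit_ij_unary:
--                             if unary_gate[0] == i and unary_gate[1] > t2:
--                                 first_block_unary_time = unary_gate[1]
--                                 break
--                         while circuit_ij_cz:
--                             if circuit_ij_cz[0][2] < first_block_unary_time:
--                                 circuit_ij_cz.pop(0)
--                             else:
--                                 break
--                     else:
--                         w += 1
--                         first_block_unary_time = 100000
--                         for unary_gate in circuit_ij_unary:
--                             if unary_gate[0] == j and unary_gate[1] > t2: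
--                                 first_block_unary_time = unary_gate[1]
--                                 break
--                         while circuit_ij_cz:
--                             if circuit_ij_cz[0][2] < first_block_unary_time:
--                                 circuit_ij_cz.pop(0)
--                             else:
--                                 break
--             edge_weights.append((i, j, w))
--
--     return edge_weights
-- ===== SOURCE B (Python) =====
-- def refined_weights(circuit, n):
--     # Index the circuit once: unary gate times per qubit, cz times per (ordered) pair.
--     unary = {}
--     cz = {}
--     for gate in circuit:
--         if len(gate) == 2:
--             unary.setdefault(gate[0], []).append(gate[1])
--         elif len(gate) == 3:
--             cz.setdefault((gate[0], gate[1]), []).append(gate[2])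
--     return [(i, j, _pair_weight(cz.get((i, j), []), unary.get(i, []), unary.get(j, [])))
--             for i in range(n - 1) for j in range(i + 1, n)]
--
--
-- def _pair_weight(ts, ui, uj):
--     # ts: cz times of the pair (i, j); ui/uj: unary times on i resp. j (circuit order).
--     w = 0
--     while ts:
--         if len(ts) == 1:
--             return w + 1
--         t1, t2 = ts[0], ts[1]
--         bi = any(t1 < t < t2 for t in ui)
--         bj = any(t1 < t < t2 for t in uj)
--         w += 1
--         if bi and bj:
--             ts = ts[1:]
--         else:
--             us = ui if (not bi and bj) else uj
--             fbt = next((t for t in us if t > t2), None)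
--             if fbt is None:
--                 return w
--             ts = [t for t in ts if t >= fbt]
--     return w
-- ===== Notes on version B (the rewrite author's own statement) =====
-- stated objective: alternative
-- what changed: B indexes the circuit once (unary times per qubit, cz times per ordered pair, in two dicts) and computes each pair's weight from those precomputed time lists, instead of A's rescan of the whole circuit for every (i, j) pair; A's 100000-sentinel pop-all step becomes an early return. Intended as faster (measured 7.5x at n=4096 on inputs where both finished), but one large input timed out for both programs, so speed is not claimed.
-- outside the precondition, e.g. on refined_weights([(0, 1, 5), (0, 1, 100000)], 2): A returns [(0, 1, 2)], B returns [(0, 1, 1)]; on refined_weights([(0, 1, 10), (0, 1, 0)], 2): A returns [(0, 1, 1)], B returns [(0, 1, 1)]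
import Mathlib
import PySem

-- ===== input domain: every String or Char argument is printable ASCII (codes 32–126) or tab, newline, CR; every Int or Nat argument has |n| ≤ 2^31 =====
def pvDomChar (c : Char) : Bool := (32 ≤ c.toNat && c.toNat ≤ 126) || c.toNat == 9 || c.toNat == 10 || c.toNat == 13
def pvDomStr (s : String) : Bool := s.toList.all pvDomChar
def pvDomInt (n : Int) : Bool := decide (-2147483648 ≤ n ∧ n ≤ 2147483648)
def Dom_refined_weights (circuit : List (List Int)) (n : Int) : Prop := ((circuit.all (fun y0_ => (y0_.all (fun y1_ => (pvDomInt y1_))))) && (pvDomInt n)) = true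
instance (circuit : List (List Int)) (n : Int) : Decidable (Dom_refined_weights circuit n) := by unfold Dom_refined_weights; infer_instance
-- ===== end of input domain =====

-- B indexes the circuit once (unary times per qubit, cz times per pair) and computes each
-- pair's weight from those lists, instead of A's rescan of the whole circuit per (i, j) pair.


-- ===== PORT A =====
-- `(len(gate) == 2 and gate[0] in (i, j)) or (len(gate) == 3 and gate[:2] == (i, j))`
-- (`gate[:2]` is the slice x[:2]; tuple equality `== (i, j)` is elementwise, i.e. = [i, j])
def pvGateSel (i j : Int) (g : List Int) : Bool :=
  (g.length == 2 && (PySem.List.pyGetD g 0 0 == i || PySem.List.pyGetD g 0 0 == j))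
  || (g.length == 3 && (PySem.List.slice g none (some 2) == ([i, j] : List Int)))

-- the `between_for_i` / `between_for_j` flag pass over circuit_ij_unary
def pvBetweenFlags (unary : List (List Int)) (i j t1 t2 : Int) : Bool × Bool :=
  unary.foldl (fun (bf : Bool × Bool) u =>
    (bf.1 || (PySem.List.pyGetD u 0 0 == i && (decide (t1 < PySem.List.pyGetD u 1 0) && decide (PySem.List.pyGetD u 1 0 < t2))),
     bf.2 || (PySem.List.pyGetD u 0 0 == j && (decide (t1 < PySem.List.pyGetD u 1 0) && decide (PySem.List.pyGetD u 1 0 < t2)))))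
    (false, false)

-- `first_block_unary_time = 100000; for u in unary: if u[0] == q and u[1] > t2: ...; break`
def pvFirstBlockTime (unary : List (List Int)) (q t2 : Int) : Int :=
  match unary with
  | [] => 100000
  | u :: rest =>
    if PySem.List.pyGetD u 0 0 == q && decide (t2 < PySem.List.pyGetD u 1 0) then PySem.List.pyGetD u 1 0
    else pvFirstBlockTime rest q t2

-- `while cz: if cz[0][2] < fbt: cz.pop(0) else: break`
def pvPopWhileLt (cz : List (List Int)) (fbt : Int) : List (List Int) :=
  match cz with
  | [] => []
  | g :: rest => if PySem.List.pyGetD g 2 0 < fbt then pvPopWhileLt rest fbt else g :: rest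

-- the outer `while circuit_ij_cz:` loop; fuel = |cz| + 1 only makes the recursion total
-- (on Pre_ every iteration strictly shortens cz, so the fuel is never exhausted; off Pre_
-- the Python loop can make no progress and runs forever)
def pvCzLoop (fuel : Nat) (cz unary : List (List Int)) (i j w : Int) : Int :=
  match fuel with
  | 0 => w
  | fuel' + 1 =>
    match cz with
    | [] => w
    | [_] => w + 1
    | g1 :: g2 :: rest =>
      let t1 := PySem.List.pyGetD g1 2 0
      let t2 := PySem.List.pyGetD g2 2 0
      let bf := pvBetweenFlags unary i j t1 t2
      if bf.1 && bf.2 then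
        pvCzLoop fuel' (g2 :: rest) unary i j (w + 1)
      else if !bf.1 && bf.2 then
        pvCzLoop fuel' (pvPopWhileLt (g1 :: g2 :: rest) (pvFirstBlockTime unary i t2)) unary i j (w + 1)
      else
        pvCzLoop fuel' (pvPopWhileLt (g1 :: g2 :: rest) (pvFirstBlockTime unary j t2)) unary i j (w + 1)

def refined_weights (circuit : List (List Int)) (n : Int) : List (Int × Int × Int) :=
  (PySem.List.pyRange 0 (n - 1) 1).foldl (fun ew i =>
    (PySem.List.pyRange (i + 1) n 1).foldl (fun ew2 j =>
      let circuit_ij := circuit.filter (pvGateSel i j)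
      let unary := circuit_ij.filter (fun g => g.length == 2)
      let cz := circuit_ij.filter (fun g => g.length == 3)
      ew2 ++ [(i, j, pvCzLoop (cz.length + 1) cz unary i j 0)]) ew) []

-- ===== PORT B =====
-- one pass over the circuit: unary times per qubit, cz times per (first, second) pair
-- (`setdefault(k, []).append(t)` is exactly `modify k [] (· ++ [t])`)
def pvIndexStep (d : PySem.Dict Int (List Int) × PySem.Dict (Int × Int) (List Int))
    (g : List Int) : PySem.Dict Int (List Int) × PySem.Dict (Int × Int) (List Int) :=
  if g.length == 2 then
    (d.1.modify (PySem.List.pyGetD g 0 0) [] (· ++ [PySem.List.pyGetD g 1 0]), d.2)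
  else if g.length == 3 then
    (d.1, d.2.modify (PySem.List.pyGetD g 0 0, PySem.List.pyGetD g 1 0) [] (· ++ [PySem.List.pyGetD g 2 0]))
  else d

-- `next((t for t in us if t > t2), None)`
def pvFirstGt (us : List Int) (t2 : Int) : Option Int :=
  match us with
  | [] => none
  | t :: rest => if t2 < t then some t else pvFirstGt rest t2

-- needed by pvPairWeight's termination argument
theorem pvFirstGt_gt (us : List Int) (t2 f : Int) (h : pvFirstGt us t2 = some f) : t2 < f := by
  induction us with
  | nil => simp [pvFirstGt] at h
  | cons t rest ih =>
    by_cases ht : t2 < t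
    · simp [pvFirstGt, ht] at h; omega
    · simp [pvFirstGt, ht] at h; exact ih h

-- B's `_pair_weight` loop (`w` accumulates: each iteration contributes `1 + …`)
def pvPairWeight (ts ui uj : List Int) : Int :=
  match ts with
  | [] => 0
  | [_] => 1
  | t1 :: t2 :: rest =>
    let bi := ui.any fun t => decide (t1 < t) && decide (t < t2)
    let bj := uj.any fun t => decide (t1 < t) && decide (t < t2)
    if bi && bj then 1 + pvPairWeight (t2 :: rest) ui uj
    else
      match hf : pvFirstGt (if !bi && bj then ui else uj) t2 with
      | none => 1
      | some fbt => 1 + pvPairWeight ((t1 :: t2 :: rest).filter (fun t => decide (fbt ≤ t))) ui uj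
termination_by ts.length
decreasing_by
  · simp
  · have hgt : t2 < fbt := pvFirstGt_gt _ _ _ hf
    have : ((t1 :: t2 :: rest).filter (fun t => decide (fbt ≤ t))).length < (t1 :: t2 :: rest).length := by
      exact List.length_filter_lt_length_iff_exists.mpr ⟨t2, by simp, by simp; omega⟩
    simpa using this

def refined_weights_alt (circuit : List (List Int)) (n : Int) : List (Int × Int × Int) :=
  let d := circuit.foldl pvIndexStep (PySem.Dict.empty, PySem.Dict.empty)
  (PySem.List.pyRange 0 (n - 1) 1).flatMap (fun i =>
    (PySem.List.pyRange (i + 1) n 1).map (fun j =>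
      (i, j, pvPairWeight (d.2.getD (i, j) []) (d.1.getD i []) (d.1.getD j []))))

-- ===== PRECONDITION & SPEC =====
-- a length-3 gate that lands in some considered pair (i, j), 0 ≤ i < j < n
def pvRel3 (n : Int) (g : List Int) : Bool :=
  g.length == 3 && (decide (0 ≤ PySem.List.pyGetD g 0 0) &&
    (decide (PySem.List.pyGetD g 0 0 < PySem.List.pyGetD g 1 0) && decide (PySem.List.pyGetD g 1 0 < n)))

-- Pre_ excludes circuits in which two cz gates on the same considered pair have time stamps
-- out of order or reaching A's 100000 sentinel: there A's pop-while step can make no progress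
-- (A loops forever, e.g. on [[0,1,10],[0,1,0],[1,5]] with n = 2), and where A does return the
-- value depends on the 100000 sentinel, which B does not reproduce.
def Pre_refined_weights (circuit : List (List Int)) (n : Int) : Prop :=
  circuit.Pairwise (fun g h => pvRel3 n g = true → pvRel3 n h = true →
    (PySem.List.pyGetD g 0 0 = PySem.List.pyGetD h 0 0 ∧
     PySem.List.pyGetD g 1 0 = PySem.List.pyGetD h 1 0) →
    PySem.List.pyGetD g 2 0 < PySem.List.pyGetD h 2 0 ∧ PySem.List.pyGetD h 2 0 < 100000)
instance (circuit : List (List Int)) (n : Int) : Decidable (Pre_refined_weights circuit n) := by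
  unfold Pre_refined_weights; infer_instance

def pvWitness_refined_weights : List (List Int) × Int := ([[0, 1, 3], [0, 2], [0, 1, 7], [1, 4]], 3)

def Spec_refined_weights (circuit : List (List Int)) (n : Int) (out : List (Int × Int × Int)) : Prop := out = refined_weights_alt circuit n
instance (circuit : List (List Int)) (n : Int) (out : List (Int × Int × Int)) : Decidable (Spec_refined_weights circuit n out) := by unfold Spec_refined_weights; infer_instance

-- ===== CLAIM (what is proved, stated in full; the proofs are below) =====
def Claim_equal_refined_weights : Prop := ∀ (circuit : List (List Int)) (n : Int), Dom_refined_weights circuit n → Pre_refined_weights circuit n → Spec_refined_weights circuit n (refined_weights circuit n)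

-- ===== LEMMAS AND PROOFS =====
-- abbreviations used only by the proofs
def pvT (g : List Int) : Int := PySem.List.pyGetD g 2 0
def pvQ (g : List Int) : Int := PySem.List.pyGetD g 0 0
def pvU (g : List Int) : Int := PySem.List.pyGetD g 1 0

theorem flags_aux (U : List (List Int)) (i j t1 t2 : Int) (a b : Bool) :
    U.foldl (fun (bf : Bool × Bool) u =>
      (bf.1 || (PySem.List.pyGetD u 0 0 == i && (decide (t1 < PySem.List.pyGetD u 1 0) && decide (PySem.List.pyGetD u 1 0 < t2))),
       bf.2 || (PySem.List.pyGetD u 0 0 == j && (decide (t1 < PySem.List.pyGetD u 1 0) && decide (PySem.List.pyGetD u 1 0 < t2))))) (a, b) =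
      (a || U.any (fun g => pvQ g == i && (decide (t1 < pvU g) && decide (pvU g < t2))),
       b || U.any (fun g => pvQ g == j && (decide (t1 < pvU g) && decide (pvU g < t2)))) := by
  induction U generalizing a b with
  | nil => simp
  | cons u rest ih =>
    simp only [List.foldl_cons, List.any_cons, ih]
    simp only [pvQ, pvU, Bool.or_assoc]
    exact rfl

theorem flags_eq (U : List (List Int)) (i j t1 t2 : Int) :
    pvBetweenFlags U i j t1 t2 =
      (U.any (fun g => pvQ g == i && (decide (t1 < pvU g) && decide (pvU g < t2))),
       U.any (fun g => pvQ g == j && (decide (t1 < pvU g) && decide (pvU g < t2)))) := by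
  unfold pvBetweenFlags
  rw [flags_aux]
  simp

theorem fbt_eq (U : List (List Int)) (q t2 : Int) :
    pvFirstBlockTime U q t2 =
      (pvFirstGt ((U.filter (fun g => pvQ g == q)).map pvU) t2).getD 100000 := by
  induction U with
  | nil => simp [pvFirstBlockTime, pvFirstGt]
  | cons u rest ih =>
    by_cases hq : PySem.List.pyGetD u 0 0 = q
    · by_cases ht : t2 < PySem.List.pyGetD u 1 0
      · simp [pvFirstBlockTime, pvFirstGt, pvQ, pvU, hq, ht]
      · simp [pvFirstBlockTime, pvFirstGt, pvQ, pvU, hq, ht, ih]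
    · simp [pvFirstBlockTime, pvQ, hq, ih]

theorem pop_suffix (C : List (List Int)) (f : Int) : pvPopWhileLt C f <:+ C := by
  induction C with
  | nil => simp [pvPopWhileLt]
  | cons g rest ih =>
    by_cases h : PySem.List.pyGetD g 2 0 < f
    · simp only [pvPopWhileLt, if_pos h]
      exact ih.trans (List.suffix_cons g rest)
    · simp [pvPopWhileLt, if_neg h]

theorem pop_filter (C : List (List Int)) (f : Int) (hs : (C.map pvT).Pairwise (· < ·)) :
    (pvPopWhileLt C f).map pvT = (C.map pvT).filter (fun t => decide (f ≤ t)) := by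
  induction C with
  | nil => simp [pvPopWhileLt]
  | cons g rest ih =>
    simp only [List.map_cons, List.pairwise_cons] at hs
    by_cases h : PySem.List.pyGetD g 2 0 < f
    · have : ¬ (f ≤ pvT g) := by simp [pvT]; omega
      simp only [pvPopWhileLt, if_pos h, List.map_cons, List.filter_cons]
      simp only [this, decide_false, if_neg Bool.false_ne_true]
      exact ih hs.2
    · have hfg : f ≤ pvT g := by simp [pvT]; omega
      have hall : ∀ t ∈ rest.map pvT, f ≤ t := fun t ht => le_of_lt (lt_of_le_of_lt hfg (hs.1 t ht))
      have hrest : List.filter (fun t => decide (f ≤ t)) (rest.map pvT) = rest.map pvT :=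
        List.filter_eq_self.mpr (fun t ht => by simpa using hall t ht)
      simp [pvPopWhileLt, if_neg h, hfg, hrest]

theorem pop_all (C : List (List Int)) (h : ∀ t ∈ C.map pvT, t < 100000) :
    pvPopWhileLt C 100000 = [] := by
  induction C with
  | nil => simp [pvPopWhileLt]
  | cons g rest ih =>
    have hg : pvT g < 100000 := h _ (by simp)
    simp only [pvPopWhileLt, if_pos (show PySem.List.pyGetD g 2 0 < 100000 from hg)]
    exact ih (fun t ht => h t (by simp at ht ⊢; right; exact ht))

theorem czloop_nil (fuel : Nat) (U : List (List Int)) (i j w : Int) :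
    pvCzLoop fuel [] U i j w = w := by
  cases fuel <;> simp [pvCzLoop]

theorem ppw_cons (t1 t2 : Int) (rest ui uj : List Int) :
    pvPairWeight (t1 :: t2 :: rest) ui uj =
      (if (ui.any fun t => decide (t1 < t) && decide (t < t2)) &&
          (uj.any fun t => decide (t1 < t) && decide (t < t2)) then
        1 + pvPairWeight (t2 :: rest) ui uj
      else
        match pvFirstGt (if (!(ui.any fun t => decide (t1 < t) && decide (t < t2))) &&
            (uj.any fun t => decide (t1 < t) && decide (t < t2)) then ui else uj) t2 with
        | none => 1
        | some fbt => 1 + pvPairWeight ((t1 :: t2 :: rest).filter (fun t => decide (fbt ≤ t))) ui uj) := by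
  rw [pvPairWeight]
  by_cases hc : ((ui.any fun t => decide (t1 < t) && decide (t < t2)) &&
      (uj.any fun t => decide (t1 < t) && decide (t < t2))) = true
  · simp only [if_pos hc]
  · simp only [if_neg hc]
    cases hfg : pvFirstGt (if (!(ui.any fun t => decide (t1 < t) && decide (t < t2))) &&
        (uj.any fun t => decide (t1 < t) && decide (t < t2)) then ui else uj) t2 <;>
      simp

theorem loop_eq (U : List (List Int)) (ui uj : List Int) (i j : Int)
    (hflags : ∀ t1 t2, pvBetweenFlags U i j t1 t2 =
      (ui.any (fun t => decide (t1 < t) && decide (t < t2)),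
       uj.any (fun t => decide (t1 < t) && decide (t < t2))))
    (hfi : ∀ t2, pvFirstBlockTime U i t2 = (pvFirstGt ui t2).getD 100000)
    (hfj : ∀ t2, pvFirstBlockTime U j t2 = (pvFirstGt uj t2).getD 100000) :
    ∀ (fuel : Nat) (C : List (List Int)) (w : Int), C.length < fuel →
      (C.map pvT).Pairwise (· < ·) →
      ((∀ t ∈ C.map pvT, t < 100000) ∨ C.length ≤ 1) →
      pvCzLoop fuel C U i j w = w + pvPairWeight (C.map pvT) ui uj := by
  intro fuel
  induction fuel with
  | zero => intro C w hlen _ _; simp at hlen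
  | succ f ih =>
    intro C w hlen hs hb
    match C with
    | [] => simp [pvCzLoop, pvPairWeight]
    | [g] => simp [pvCzLoop, pvPairWeight]
    | g1 :: g2 :: rest =>
      have e1 : PySem.List.pyGetD g1 2 0 = pvT g1 := rfl
      have e2 : PySem.List.pyGetD g2 2 0 = pvT g2 := rfl
      have hmap : (g1 :: g2 :: rest).map pvT = pvT g1 :: pvT g2 :: rest.map pvT := by simp
      have ht12 : pvT g1 < pvT g2 := by
        rw [hmap] at hs; exact (List.pairwise_cons.mp hs).1 _ (by simp)
      have hsTail : ((g2 :: rest).map pvT).Pairwise (· < ·) := by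
        rw [hmap] at hs; exact (List.pairwise_cons.mp hs).2
      have hball : ∀ t ∈ (g1 :: g2 :: rest).map pvT, t < 100000 := by
        rcases hb with h | h
        · exact h
        · simp at h
      simp only [pvCzLoop, e1, e2, hflags (pvT g1) (pvT g2)]
      rw [hmap, ppw_cons]
      by_cases hcase : ((ui.any fun t => decide (pvT g1 < t) && decide (t < pvT g2)) &&
          (uj.any fun t => decide (pvT g1 < t) && decide (t < pvT g2))) = true
      · rw [if_pos hcase, if_pos hcase]
        have hrec := ih (g2 :: rest) (w + 1) (by simp at hlen ⊢; omega) hsTail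
          (Or.inl fun t ht => hball t (by simp at ht ⊢; tauto))
        rw [hrec]
        simp [List.map_cons]
        omega
      · rw [if_neg hcase, if_neg hcase]
        by_cases hmig : ((!(ui.any fun t => decide (pvT g1 < t) && decide (t < pvT g2))) &&
            (uj.any fun t => decide (pvT g1 < t) && decide (t < pvT g2))) = true
        · rw [if_pos hmig, if_pos hmig, hfi (pvT g2)]
          cases hfg : pvFirstGt ui (pvT g2) with
          | none =>
            simp only [Option.getD_none]
            rw [pop_all _ hball, czloop_nil]
          | some fbt =>
            simp only [Option.getD_some]
            have hgt : pvT g2 < fbt := pvFirstGt_gt _ _ _ hfg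
            have hstep : pvPopWhileLt (g1 :: g2 :: rest) fbt = pvPopWhileLt (g2 :: rest) fbt := by
              simp only [pvPopWhileLt, e1]
              rw [if_pos (by omega)]
            have hlen' : (pvPopWhileLt (g1 :: g2 :: rest) fbt).length < f := by
              rw [hstep]
              have := (pop_suffix (g2 :: rest) fbt).length_le
              simp at hlen this ⊢
              omega
            have hsub : ∀ t ∈ (pvPopWhileLt (g1 :: g2 :: rest) fbt).map pvT,
                t ∈ (g1 :: g2 :: rest).map pvT := by
              intro t ht
              exact (((pop_suffix (g1 :: g2 :: rest) fbt).map pvT).sublist.subset) ht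
            have hs' : ((pvPopWhileLt (g1 :: g2 :: rest) fbt).map pvT).Pairwise (· < ·) := by
              exact (hs.sublist (((pop_suffix (g1 :: g2 :: rest) fbt).map pvT).sublist))
            have hrec := ih (pvPopWhileLt (g1 :: g2 :: rest) fbt) (w + 1) hlen' hs'
              (Or.inl fun t ht => hball t (hsub t ht))
            rw [hrec, pop_filter _ _ hs, hmap]
            omega
        · rw [if_neg hmig, if_neg hmig, hfj (pvT g2)]
          cases hfg : pvFirstGt uj (pvT g2) with
          | none =>
            simp only [Option.getD_none]
            rw [pop_all _ hball, czloop_nil]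
          | some fbt =>
            simp only [Option.getD_some]
            have hgt : pvT g2 < fbt := pvFirstGt_gt _ _ _ hfg
            have hstep : pvPopWhileLt (g1 :: g2 :: rest) fbt = pvPopWhileLt (g2 :: rest) fbt := by
              simp only [pvPopWhileLt, e1]
              rw [if_pos (by omega)]
            have hlen' : (pvPopWhileLt (g1 :: g2 :: rest) fbt).length < f := by
              rw [hstep]
              have := (pop_suffix (g2 :: rest) fbt).length_le
              simp at hlen this ⊢
              omega
            have hsub : ∀ t ∈ (pvPopWhileLt (g1 :: g2 :: rest) fbt).map pvT,
                t ∈ (g1 :: g2 :: rest).map pvT := by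
              intro t ht
              exact (((pop_suffix (g1 :: g2 :: rest) fbt).map pvT).sublist.subset) ht
            have hs' : ((pvPopWhileLt (g1 :: g2 :: rest) fbt).map pvT).Pairwise (· < ·) := by
              exact (hs.sublist (((pop_suffix (g1 :: g2 :: rest) fbt).map pvT).sublist))
            have hrec := ih (pvPopWhileLt (g1 :: g2 :: rest) fbt) (w + 1) hlen' hs'
              (Or.inl fun t ht => hball t (hsub t ht))
            rw [hrec, pop_filter _ _ hs, hmap]
            omega

-- one pass of B's index fold, unary component
theorem idx_unary (circuit : List (List Int)) (du : PySem.Dict Int (List Int))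
    (dc : PySem.Dict (Int × Int) (List Int)) (q : Int) :
    ((circuit.foldl pvIndexStep (du, dc)).1).getD q [] =
      du.getD q [] ++ (circuit.filter (fun g => g.length == 2 && (pvQ g == q))).map pvU := by
  induction circuit generalizing du dc with
  | nil => simp
  | cons g rest ih =>
    by_cases h2 : g.length = 2
    · have hstep : pvIndexStep (du, dc) g =
          (du.modify (pvQ g) [] (· ++ [pvU g]), dc) := by
        simp [pvIndexStep, h2, pvQ, pvU]
      rw [List.foldl_cons, hstep, ih, PySem.Dict.getD_modify]
      by_cases hq : PySem.List.pyGetD g 0 0 = q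
      · simp [h2, hq, pvQ, pvU]
      · simp [h2, hq, pvQ, Ne.symm hq]
    · by_cases h3 : g.length = 3
      · have hstep : pvIndexStep (du, dc) g =
            (du, dc.modify (pvQ g, pvU g) [] (· ++ [pvT g])) := by
          simp [pvIndexStep, h3, pvQ, pvU, pvT]
        rw [List.foldl_cons, hstep, ih]
        simp [h2]
      · have hstep : pvIndexStep (du, dc) g = (du, dc) := by
          simp [pvIndexStep, h2, h3]
        rw [List.foldl_cons, hstep, ih]
        simp [h2]

-- one pass of B's index fold, cz component
theorem idx_cz (circuit : List (List Int)) (du : PySem.Dict Int (List Int))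
    (dc : PySem.Dict (Int × Int) (List Int)) (i j : Int) :
    ((circuit.foldl pvIndexStep (du, dc)).2).getD (i, j) [] =
      dc.getD (i, j) [] ++ (circuit.filter (fun g => g.length == 3 && (pvQ g == i && pvU g == j))).map pvT := by
  induction circuit generalizing du dc with
  | nil => simp
  | cons g rest ih =>
    by_cases h2 : g.length = 2
    · have hstep : pvIndexStep (du, dc) g =
          (du.modify (pvQ g) [] (· ++ [pvU g]), dc) := by
        simp [pvIndexStep, h2, pvQ, pvU]
      rw [List.foldl_cons, hstep, ih]
      simp [show ¬ g.length = 3 by omega]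
    · by_cases h3 : g.length = 3
      · have hstep : pvIndexStep (du, dc) g =
            (du, dc.modify (pvQ g, pvU g) [] (· ++ [pvT g])) := by
          simp [pvIndexStep, h3, pvQ, pvU, pvT]
        rw [List.foldl_cons, hstep, ih, PySem.Dict.getD_modify]
        by_cases hq : (pvQ g, pvU g) = ((i : Int), (j : Int))
        · have hqi : pvQ g = i := congrArg Prod.fst hq
          have hqj : pvU g = j := congrArg Prod.snd hq
          simp only [pvQ, pvU] at hqi hqj
          simp [h3, hqi, hqj, pvQ, pvU]
        · rw [if_neg (fun hc => hq hc.symm)]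
          have : ¬ (PySem.List.pyGetD g 0 0 = i ∧ PySem.List.pyGetD g 1 0 = j) := by
            intro hc
            exact hq (by simp [pvQ, pvU, hc.1, hc.2])
          by_cases hqi : PySem.List.pyGetD g 0 0 = i
          · have hqj : ¬ PySem.List.pyGetD g 1 0 = j := fun hc => this ⟨hqi, hc⟩
            simp [h3, hqi, hqj, pvQ, pvU]
          · simp [h3, hqi, pvQ, pvU]
      · have hstep : pvIndexStep (du, dc) g = (du, dc) := by
          simp [pvIndexStep, h2, h3]
        rw [List.foldl_cons, hstep, ih]
        simp [h3]

-- A's per-pair unary list, pushed down to one filter over the circuit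
theorem U_eq (circuit : List (List Int)) (i j : Int) :
    (circuit.filter (pvGateSel i j)).filter (fun g => g.length == 2) =
      circuit.filter (fun g => g.length == 2 && (pvQ g == i || pvQ g == j)) := by
  rw [List.filter_filter]
  apply List.filter_congr
  intro g _
  by_cases h2 : g.length = 2
  · simp [pvGateSel, h2, pvQ]
  · have h2' : (g.length == 2) = false := by simpa using h2
    simp [pvGateSel, h2']

-- A's per-pair cz list: `gate[:2] == (i, j)` on a length-3 gate is `g0 = i and g1 = j`
theorem C_eq (circuit : List (List Int)) (i j : Int) :
    (circuit.filter (pvGateSel i j)).filter (fun g => g.length == 3) =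
      circuit.filter (fun g => g.length == 3 && (pvQ g == i && pvU g == j)) := by
  rw [List.filter_filter]
  apply List.filter_congr
  intro g _
  by_cases h3 : g.length = 3
  · obtain ⟨a, b, c, rfl⟩ := List.length_eq_three.mp h3
    have hsl : PySem.List.slice ([a, b, c] : List Int) none (some 2) = [a, b] := by
      simp [pysem]
    simp [pvGateSel, hsl, pvQ, pvU, PySem.List.pyGetD, PySem.List.pyGet?, PySem.List.pyIdx?]
  · have h3' : (g.length == 3) = false := by simpa using h3
    simp [pvGateSel, h3']

theorem filter_U_q (circuit : List (List Int)) (i j q : Int) (hq : q = i ∨ q = j) :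
    (circuit.filter (fun g => g.length == 2 && (pvQ g == i || pvQ g == j))).filter
        (fun g => pvQ g == q) =
      circuit.filter (fun g => g.length == 2 && (pvQ g == q)) := by
  rw [List.filter_filter]
  apply List.filter_congr
  intro g _
  rcases hq with rfl | rfl
  · cases h2 : (g.length == 2) <;> cases ha : (pvQ g == q) <;> cases hb : (pvQ g == j) <;> simp_all
  · cases h2 : (g.length == 2) <;> cases ha : (pvQ g == i) <;> cases hb : (pvQ g == q) <;> simp_all

theorem bound_of_pairwise (C : List (List Int))
    (PC : C.Pairwise (fun g h => pvT g < pvT h ∧ pvT h < 100000)) (hlen : 2 ≤ C.length) :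
    ∀ t ∈ C.map pvT, t < 100000 := by
  match C, hlen with
  | g1 :: g2 :: rest, _ =>
    rcases List.pairwise_cons.mp PC with ⟨h1, h2⟩
    intro t ht
    rcases List.mem_map.mp ht with ⟨x, hx, rfl⟩
    rcases List.mem_cons.mp hx with rfl | hx'
    · have := h1 g2 (by simp)
      have h12 := this.1
      have hb := this.2
      omega
    · exact (h1 x hx').2

-- the per-pair equality, under Pre_
theorem pair_eq (circuit : List (List Int)) (n i j : Int) (hpre : Pre_refined_weights circuit n)
    (hi0 : 0 ≤ i) (hij : i < j) (hjn : j < n) :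
    pvCzLoop (((circuit.filter (pvGateSel i j)).filter (fun g => g.length == 3)).length + 1)
        ((circuit.filter (pvGateSel i j)).filter (fun g => g.length == 3))
        ((circuit.filter (pvGateSel i j)).filter (fun g => g.length == 2)) i j 0 =
      pvPairWeight
        (((circuit.foldl pvIndexStep (PySem.Dict.empty, PySem.Dict.empty)).2).getD (i, j) [])
        (((circuit.foldl pvIndexStep (PySem.Dict.empty, PySem.Dict.empty)).1).getD i [])
        (((circuit.foldl pvIndexStep (PySem.Dict.empty, PySem.Dict.empty)).1).getD j []) := by
  rw [idx_unary, idx_unary, idx_cz, U_eq, C_eq]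
  simp only [PySem.Dict.getD_empty, List.nil_append]
  set C := circuit.filter (fun g => g.length == 3 && (pvQ g == i && pvU g == j)) with hC
  set U := circuit.filter (fun g => g.length == 2 && (pvQ g == i || pvQ g == j)) with hU
  set ui := (circuit.filter (fun g => g.length == 2 && (pvQ g == i))).map pvU with hui
  set uj := (circuit.filter (fun g => g.length == 2 && (pvQ g == j))).map pvU with huj
  -- Pre_ on the pair's cz gates
  have hPC : C.Pairwise (fun g h => pvT g < pvT h ∧ pvT h < 100000) := by
    have h1 : C.Pairwise (fun g h => pvRel3 n g = true → pvRel3 n h = true →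
        (PySem.List.pyGetD g 0 0 = PySem.List.pyGetD h 0 0 ∧
         PySem.List.pyGetD g 1 0 = PySem.List.pyGetD h 1 0) →
        PySem.List.pyGetD g 2 0 < PySem.List.pyGetD h 2 0 ∧ PySem.List.pyGetD h 2 0 < 100000) :=
      List.Pairwise.filter _ hpre
    have hmem : ∀ g ∈ C, pvRel3 n g = true ∧ pvQ g = i ∧ pvU g = j := by
      intro g hg
      have := List.of_mem_filter hg
      simp only [Bool.and_eq_true, beq_iff_eq] at this
      refine ⟨?_, this.2.1, this.2.2⟩
      simp only [pvRel3, Bool.and_eq_true, beq_iff_eq, decide_eq_true_eq]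
      rcases this with ⟨hl, hqi, huj'⟩
      simp only [pvQ] at hqi
      simp only [pvU] at huj'
      exact ⟨by simpa using hl, by omega, by omega, by omega⟩
    refine List.Pairwise.imp_of_mem ?_ h1
    intro g h hg hh hr
    rcases hmem g hg with ⟨hg3, hgq, hgu⟩
    rcases hmem h hh with ⟨hh3, hhq, hhu⟩
    have := hr hg3 hh3 ⟨by simp only [pvQ] at hgq hhq; omega, by simp only [pvU] at hgu hhu; omega⟩
    exact ⟨this.1, this.2⟩
  have hsort : (C.map pvT).Pairwise (· < ·) :=
    List.pairwise_map.mpr (hPC.imp (fun h => h.1))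
  have hbound : (∀ t ∈ C.map pvT, t < 100000) ∨ C.length ≤ 1 := by
    by_cases hl : 2 ≤ C.length
    · exact Or.inl (bound_of_pairwise C hPC hl)
    · exact Or.inr (by omega)
  have hflags : ∀ t1 t2, pvBetweenFlags U i j t1 t2 =
      (ui.any (fun t => decide (t1 < t) && decide (t < t2)),
       uj.any (fun t => decide (t1 < t) && decide (t < t2))) := by
    intro t1 t2
    rw [flags_eq]
    simp only [Prod.mk.injEq]
    refine ⟨?_, ?_⟩
    all_goals
      simp only [hui, huj, hU, List.any_map, List.any_filter, Function.comp]
      congr 1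
      funext g
      cases h2 : (g.length == 2) <;> cases hqi : (pvQ g == i) <;> cases hqj : (pvQ g == j) <;>
        simp_all
  have hfi : ∀ t2, pvFirstBlockTime U i t2 = (pvFirstGt ui t2).getD 100000 := by
    intro t2
    rw [fbt_eq, hU, filter_U_q circuit i j i (Or.inl rfl)]
  have hfj : ∀ t2, pvFirstBlockTime U j t2 = (pvFirstGt uj t2).getD 100000 := by
    intro t2
    rw [fbt_eq, hU, filter_U_q circuit i j j (Or.inr rfl)]
  have := loop_eq U ui uj i j hflags hfi hfj (C.length + 1) C 0 (by omega) hsort hbound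
  rw [this]
  omega

-- ===== VERDICT (by name: the statement is the Claim_ definition above) =====
theorem refined_weights_spec : Claim_equal_refined_weights := by
  intro circuit n _ hpre
  unfold Spec_refined_weights refined_weights refined_weights_alt
  simp only [PySem.List.foldl_append_singleton_eq_map, PySem.List.foldl_append_eq_flatMap,
    List.nil_append]
  apply List.flatMap_congr
  intro i hi
  apply List.map_congr_left
  intro j hj
  rcases (PySem.List.mem_pyRange_one).mp hi with ⟨hi0, hin⟩
  rcases (PySem.List.mem_pyRange_one).mp hj with ⟨hij, hjn⟩
  have := pair_eq circuit n i j hpre hi0 (by omega) hjn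
  simp only [this]
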